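-- pv_equiv track=rewrite | github.com/981377660LMT/algorithm-study | 19_数学/因数筛/模板-筛法计算每个因子的倍数有多少个.py | getMulti
-- ===== SOURCE A (Python) =====
-- from collections import Counter
-- from typing import List
--
-- def getMulti(nums: List[int]) -> Counter:
--     """统计对于每个因子，原数组中有多少个他的倍数"""
--     MAX = max(nums)
--     counter = Counter(nums)
--     multiCouner = Counter()
--     for factor in range(1, MAX + 1):
--         for multi in range(factor, MAX + 1, factor):
--             multiCouner[factor] += counter[multi]
--     return multiCouner
-- ===== SOURCE B (Python) =====
-- from collections import Counter
-- from typing import List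
--
-- def getMulti(nums: List[int]) -> Counter:
--     """统计对于每个因子，原数组中有多少个他的倍数"""
--     MAX = max(nums)
--     res = [0] * (MAX + 1)
--     for v, c in Counter(nums).items():
--         if v < 1:
--             continue
--         i = 1
--         while i * i <= v:
--             if v % i == 0:
--                 res[i] += c
--                 j = v // i
--                 if j != i:
--                     res[j] += c
--             i += 1
--     multiCounter = Counter()
--     for f in range(1, MAX + 1):
--         multiCounter[f] = res[f]
--     return multiCounter
-- ===== Notes on version B (the rewrite author's own statement) =====
-- stated objective: alternative
-- what changed: Instead of A's harmonic double loop over all factor/multiple pairs with dict updates, B enumerates the divisors of each distinct positive value up to sqrt(v) and accumulates its count into a flat array, then emits the counts for factors 1..MAX in one pass; intended as faster (O(MAX + d*sqrt(MAX)) vs O(MAX log MAX)) but a timing run measured only 1.26x at the largest finished size, so no speed is claimed.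
import Mathlib
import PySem

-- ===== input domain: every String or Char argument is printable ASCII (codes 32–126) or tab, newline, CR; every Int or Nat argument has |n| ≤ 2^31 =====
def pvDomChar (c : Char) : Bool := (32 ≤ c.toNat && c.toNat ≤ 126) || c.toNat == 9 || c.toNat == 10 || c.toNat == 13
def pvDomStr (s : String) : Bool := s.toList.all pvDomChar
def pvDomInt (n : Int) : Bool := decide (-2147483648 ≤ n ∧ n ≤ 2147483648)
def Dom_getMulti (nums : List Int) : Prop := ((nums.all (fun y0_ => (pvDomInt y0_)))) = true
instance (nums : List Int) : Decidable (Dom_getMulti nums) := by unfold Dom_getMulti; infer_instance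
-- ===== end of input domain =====

-- B replaces A's harmonic factor/multiple double dict loop by divisor enumeration per distinct
-- value into a flat array plus one assembly pass (objective: alternative).

-- ===== PORT A =====
def getMulti (nums : List Int) : List (Int × Int) :=
  match PySem.List.max? nums (fun x => x) with
  | none => []  -- unreachable under Pre_getMulti: Python's max([]) raises ValueError
  | some MAX =>
    let counter : PySem.Dict Int Int := PySem.Dict.counter nums
    let multiCouner : PySem.Dict Int Int :=
      (PySem.List.pyRange 1 (MAX + 1) 1).foldl (fun d factor =>
        (PySem.List.pyRange factor (MAX + 1) factor).foldl (fun d multi =>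
          d.modify factor 0 (· + counter.getD multi 0)) d)
        PySem.Dict.empty
    multiCouner.items

-- ===== PORT B =====
-- res[i] += c of Source B; exact for 0 ≤ i < res.length, which holds for every index this algorithm touches
def pyAddAt (res : List Int) (i : Int) (c : Int) : List Int :=
  res.set i.toNat (PySem.List.pyGetD res i 0 + c)

-- the `while i * i <= v:` divisor loop of Source B
def divLoop (v c : Int) (i : Int) (res : List Int) : List Int :=
  if h : i * i ≤ v then
    divLoop v c (i + 1)
      (if PySem.Int.mod v i = 0 then
        let res1 := pyAddAt res i c
        let j := PySem.Int.floordiv v i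
        if j ≠ i then pyAddAt res1 j c else res1
      else res)
  else res
termination_by (v + 1 - i).toNat
decreasing_by
  have hi : i ≤ v := by nlinarith [sq_nonneg i, sq_nonneg (i - 1)]
  omega

def getMulti_alt (nums : List Int) : List (Int × Int) :=
  match PySem.List.max? nums (fun x => x) with
  | none => []  -- unreachable under Pre_getMulti: Python's max([]) raises ValueError
  | some MAX =>
    let res0 : List Int := List.replicate (MAX + 1).toNat 0
    let res := (PySem.Dict.counter nums).items.foldl
      (fun r p => if p.1 < 1 then r else divLoop p.1 p.2 1 r) res0
    let multiCounter : PySem.Dict Int Int :=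
      (PySem.List.pyRange 1 (MAX + 1) 1).foldl
        (fun d f => d.insert f (PySem.List.pyGetD res f 0)) PySem.Dict.empty
    multiCounter.items

-- ===== PRECONDITION & SPEC =====
-- Pre_ excludes only the empty list, on which Python's A raises ValueError (max of empty sequence).
def Pre_getMulti (nums : List Int) : Prop := nums ≠ []
instance (nums : List Int) : Decidable (Pre_getMulti nums) := by unfold Pre_getMulti; infer_instance
def pvWitness_getMulti : List Int := [2]
def Spec_getMulti (nums : List Int) (out : List (Int × Int)) : Prop := out = getMulti_alt nums
instance (nums : List Int) (out : List (Int × Int)) : Decidable (Spec_getMulti nums out) := by unfold Spec_getMulti; infer_instance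

-- ===== CLAIM (what is proved, stated in full; the proofs are below) =====
def Claim_equal_getMulti : Prop := ∀ (nums : List Int), Dom_getMulti nums → Pre_getMulti nums → Spec_getMulti nums (getMulti nums)

-- ===== LEMMAS AND PROOFS =====


lemma sum_ite_eq_mem (q : Int → Bool) (x : Int) :
    ∀ (V : List Int), V.Nodup →
    (V.map (fun v => if q v ∧ x = v then (1:Int) else 0)).sum = if q x ∧ x ∈ V then 1 else 0 := by
  intro V
  induction V with
  | nil => simp
  | cons a V ih =>
    intro hnd
    rw [List.nodup_cons] at hnd
    simp only [List.map_cons, List.sum_cons, ih hnd.2, List.mem_cons]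
    by_cases hx : x = a
    · subst hx
      have : x ∉ V := hnd.1
      by_cases hq : q x <;> simp [hq, this]
    · by_cases hq : q x <;> simp [hq, hx]

lemma sum_count_eq_countP (V : List Int) (q : Int → Bool) (hnd : V.Nodup) :
    ∀ nums : List Int, (∀ x ∈ nums, q x → x ∈ V) →
    (V.map (fun v => if q v then (nums.count v : Int) else 0)).sum = (nums.countP q : Int) := by
  intro nums
  induction nums with
  | nil =>
    intro _
    have : (V.map (fun v => if q v then (([] : List Int).count v : Int) else 0)) = V.map (fun _ => (0:Int)) := by
      apply List.map_congr_left; intro v _; simp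
    simp [this]
  | cons x t ih =>
    intro hcov
    have h1 : (V.map (fun v => if q v then ((x :: t).count v : Int) else 0))
        = V.map (fun v => (if q v then (t.count v : Int) else 0) + (if q v ∧ x = v then (1:Int) else 0)) := by
      apply List.map_congr_left
      intro v hv
      by_cases hq : q v
      · by_cases hxv : x = v
        · subst hxv; simp [hq, List.count_cons]
        · have : ¬ ((x : Int) == v) = true := by simpa using hxv
          simp [hq, List.count_cons, hxv, this]
      · simp [hq]
    rw [h1]
    rw [PySem.List.sum_map_add_int V (fun v => if q v then (t.count v : Int) else 0) (fun v => if q v ∧ x = v then (1:Int) else 0)]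
    rw [ih (fun y hy => hcov y (List.mem_cons_of_mem _ hy))]
    rw [sum_ite_eq_mem q x V hnd]
    rw [List.countP_cons]
    by_cases hq : q x
    · have : x ∈ V := hcov x (List.mem_cons_self) hq
      simp [hq, this]
    · simp [hq]


lemma foldl_insert_items (w : Int → Int) (vf : PySem.Dict Int Int → Int → Int)
    (hv : ∀ d f, d.contains f = false → vf d f = w f) :
    ∀ (fs : List Int) (d : PySem.Dict Int Int), fs.Nodup → (∀ f ∈ fs, d.contains f = false) →
    (fs.foldl (fun d f => d.insert f (vf d f)) d).items = d.items ++ fs.map (fun f => (f, w f)) := by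
  intro fs
  induction fs with
  | nil => intro d _ _; simp
  | cons a fs ih =>
    intro d hnd hfresh
    rw [List.nodup_cons] at hnd
    have ha : d.contains a = false := hfresh a (List.mem_cons_self)
    have hfresh' : ∀ f ∈ fs, (d.insert a (vf d a)).contains f = false := by
      intro f hf
      rw [PySem.Dict.contains_insert]
      have : f ≠ a := fun h => hnd.1 (h ▸ hf)
      simp [this, hfresh f (List.mem_cons_of_mem _ hf)]
    simp only [List.foldl_cons]
    rw [ih _ hnd.2 hfresh']
    rw [PySem.Dict.items_insert_of_not_contains d _ ha, hv d a ha]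
    simp

lemma inner_collapse (f : Int) (g : Int → Int) :
    ∀ (L : List Int) (d : PySem.Dict Int Int), L ≠ [] →
    L.foldl (fun d m => d.modify f 0 (· + g m)) d = d.insert f (d.getD f 0 + (L.map g).sum) := by
  intro L
  induction L with
  | nil => intro d h; exact absurd rfl h
  | cons a L ih =>
    intro d _
    cases L with
    | nil => simp [PySem.Dict.modify]
    | cons b L' =>
      simp only [List.foldl_cons]
      have := ih (d.modify f 0 (· + g a)) (by simp)
      simp only [List.foldl_cons] at this
      rw [this]
      simp only [PySem.Dict.modify]
      rw [PySem.Dict.getD_insert_self, PySem.Dict.insert_insert_self]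
      simp [List.sum_cons]
      ring_nf

lemma pyRange_nodup (a b s : Int) (hs : 0 < s) : (PySem.List.pyRange a b s).Nodup := by
  rw [PySem.List.pyRange_of_pos a b hs]
  apply List.Nodup.map
  · intro x y h
    simp only at h
    have : s * (x:Int) = s * y := by omega
    have := mul_left_cancel₀ (by omega : (s:Int) ≠ 0) this
    exact_mod_cast this
  · exact List.nodup_range

def pending (v i f : Int) : Bool :=
  decide (f ∣ v) && decide (1 ≤ f) && (decide (f * f ≤ v ∧ i ≤ f) || decide (v < f * f ∧ i * f ≤ v))

lemma pyAddAt_length (res : List Int) (i c : Int) : (pyAddAt res i c).length = res.length := by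
  simp [pyAddAt]

lemma divLoop_length (v c i : Int) (res : List Int) : (divLoop v c i res).length = res.length := by
  induction i, res using divLoop.induct v c with
  | case1 i res h ih =>
    rw [divLoop]
    simp only [h, dite_true]
    simp only [dite_eq_ite] at ih
    rw [ih]
    split <;> [skip; rfl]
    split <;> simp [pyAddAt_length]
  | case2 i res h =>
    rw [divLoop]
    simp [h]

lemma pending_one (v f : Int) (hv : 1 ≤ v) (hf : 1 ≤ f) : pending v 1 f = decide (f ∣ v) := by
  simp only [pending]
  by_cases hd : f ∣ v
  · obtain ⟨g, hg⟩ := id hd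
    have hg1 : 1 ≤ g := by nlinarith
    have hfv : f ≤ v := by nlinarith
    by_cases hsq : f * f ≤ v
    · simp [hd, hf, hsq]
    · simp only [hd, hf]
      simp [hsq]
      omega
  · simp [hd]



lemma getD_pyAddAt (res : List Int) (k c : Int) (hk : 1 ≤ k) (hklen : k < (res.length : Int))
    (f : Int) (hf : 1 ≤ f) :
    (pyAddAt res k c).getD f.toNat 0 = res.getD f.toNat 0 + (if f = k then c else 0) := by
  simp only [pyAddAt, PySem.List.pyGetD_of_nonneg res 0 (by omega : (0:Int) ≤ k)]
  by_cases hfk : f = k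
  · subst hfk
    rw [if_pos rfl]
    rw [List.getD_eq_getElem?_getD, List.getD_eq_getElem?_getD, List.getElem?_set]
    rw [if_pos rfl, if_pos (by omega)]
    simp
  · rw [if_neg hfk]
    rw [List.getD_eq_getElem?_getD, List.getD_eq_getElem?_getD, List.getElem?_set]
    rw [if_neg (by omega)]
    simp

-- pending facts
lemma pending_low_self (v i : Int) (hi : 1 ≤ i) (hd : i ∣ v) (hsq : i * i ≤ v) :
    pending v i i = true := by
  simp [pending, hd, hi, hsq]

lemma pending_high_cof (v i j : Int) (hv : 1 ≤ v) (hi : 1 ≤ i) (hsq : i * i ≤ v)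
    (hij : i * j = v) (hji : j ≠ i) : pending v i j = true := by
  have hj1 : 1 ≤ j := by nlinarith
  have hlt : i < j := by
    rcases lt_trichotomy i j with h | h | h
    · exact h
    · exact absurd h.symm hji
    · nlinarith
  have hd : j ∣ v := ⟨i, by linarith [hij]; ⟩
  simp only [pending, hd, hj1]
  have : v < j * j := by nlinarith
  have : i * j ≤ v := by omega
  simp_all

lemma pending_succ_not_self (v i : Int) (hsq : i * i ≤ v) : pending v (i + 1) i = false := by
  simp only [pending]
  by_cases h1 : (1:Int) ≤ i
  · simp only [Bool.and_eq_false_iff, Bool.or_eq_false_iff]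
    right; constructor <;> simp <;> intro h <;> omega
  · simp [h1]

lemma pending_succ_not_cof (v i j : Int) (hv : 1 ≤ v) (hi : 1 ≤ i)
    (hij : i * j = v) (hji : j ≠ i) (hsq : i * i ≤ v) : pending v (i + 1) j = false := by
  have hj1 : 1 ≤ j := by nlinarith
  have hlt : i < j := by
    rcases lt_trichotomy i j with h | h | h
    · exact h
    · exact absurd h.symm hji
    · nlinarith
  simp only [pending, Bool.and_eq_false_iff, Bool.or_eq_false_iff]
  right
  constructor
  · simp; intro h; nlinarith
  · simp; intro h; nlinarith

lemma pending_step_other (v i f : Int) (hv : 1 ≤ v) (hi : 1 ≤ i) (hf : 1 ≤ f)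
    (hsq : i * i ≤ v) (hfi : f ≠ i) (hnotcof : i * f ≠ v) :
    pending v (i + 1) f = pending v i f := by
  simp only [pending]
  by_cases hd : f ∣ v
  · obtain ⟨g, hg⟩ := id hd
    have hg1 : 1 ≤ g := by nlinarith
    simp only [hd, hf, decide_true, Bool.true_and, Bool.and_true]
    congr 1
    · rw [decide_eq_decide]
      constructor
      · rintro ⟨h1, h2⟩; exact ⟨h1, by omega⟩
      · rintro ⟨h1, h2⟩; exact ⟨h1, by omega⟩
    · rw [decide_eq_decide]
      constructor
      · rintro ⟨h1, h2⟩; exact ⟨h1, by nlinarith⟩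
      · rintro ⟨h1, h2⟩
        refine ⟨h1, ?_⟩
        have hig : i ≤ g := by nlinarith
        have hne : i ≠ g := by
          rintro rfl
          exact hnotcof (by rw [hg]; ring)
        have h3 : i + 1 ≤ g := by omega
        calc (i + 1) * f ≤ g * f := by nlinarith
          _ = v := by rw [hg]; ring
  · simp [hd]

lemma pending_step_ndvd (v i f : Int) (hv : 1 ≤ v) (hi : 1 ≤ i) (hf : 1 ≤ f)
    (hsq : i * i ≤ v) (hnd : ¬ i ∣ v) :
    pending v (i + 1) f = pending v i f := by
  by_cases hfi : f = i
  · subst hfi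
    simp [pending, hnd]
  · apply pending_step_other v i f hv hi hf hsq hfi
    intro h
    exact hnd ⟨f, h.symm⟩

lemma divLoop_getD (v c : Int) (hv : 1 ≤ v) :
    ∀ (i : Int) (res : List Int), 1 ≤ i → v < (res.length : Int) →
    ∀ f : Int, 1 ≤ f →
    (divLoop v c i res).getD f.toNat 0
      = res.getD f.toNat 0 + (if pending v i f then c else 0) := by
  intro i res
  induction i, res using divLoop.induct v c with
  | case1 i res h ih =>
    intro hi1 hlen f hf
    rw [divLoop]
    simp only [h, dite_true]
    simp only [dite_eq_ite] at ih ⊢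
    have hlen' : ((if PySem.Int.mod v i = 0 then
        if PySem.Int.floordiv v i ≠ i then pyAddAt (pyAddAt res i c) (PySem.Int.floordiv v i) c
        else pyAddAt res i c
      else res).length : Int) = (res.length : Int) := by
      split
      · split <;> simp [pyAddAt_length]
      · rfl
    rw [ih (by omega) (by rw [hlen']; exact hlen) f hf]
    by_cases hm : PySem.Int.mod v i = 0
    · have hdvd : i ∣ v := (PySem.Int.mod_eq_zero_iff_dvd v i).mp hm
      have hipos : (0:Int) < i := by omega
      have hjdef : PySem.Int.floordiv v i = v / i := PySem.Int.floordiv_eq_ediv_of_pos hipos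
      have hvij : i * PySem.Int.floordiv v i = v := by rw [hjdef]; exact Int.mul_ediv_cancel' hdvd
      set j := PySem.Int.floordiv v i with hjs
      have hj1 : 1 ≤ j := by nlinarith
      have hjv : j ≤ v := by nlinarith
      have hiv : i ≤ v := by nlinarith
      rw [if_pos hm]
      by_cases hji : j ≠ i
      · rw [if_pos hji]
        rw [getD_pyAddAt _ _ _ hj1 (by simp [pyAddAt_length]; omega) f hf]
        rw [getD_pyAddAt _ _ _ hi1 (by omega) f hf]
        have hPi : pending v i i = true := pending_low_self v i hi1 hdvd h
        have hPj : pending v i j = true := pending_high_cof v i j hv hi1 h hvij hji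
        have hSi : pending v (i + 1) i = false := pending_succ_not_self v i h
        have hSj : pending v (i + 1) j = false := pending_succ_not_cof v i j hv hi1 hvij hji h
        by_cases hfi : f = i
        · subst hfi
          rw [if_pos rfl, if_neg (by intro hh; exact hji (by omega)), hSi, hPi]
          simp
        · by_cases hfj : f = j
          · subst hfj
            rw [if_neg hfi, if_pos rfl, hSj, hPj]
            simp
          · rw [if_neg hfi, if_neg hfj]
            rw [pending_step_other v i f hv hi1 hf h hfi (by rw [← hvij]; intro hh; exact hfj (mul_left_cancel₀ (by omega) hh))]
            ring
      · rw [if_neg hji]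
        push_neg at hji
        rw [getD_pyAddAt _ _ _ hi1 (by omega) f hf]
        have hPi : pending v i i = true := pending_low_self v i hi1 hdvd h
        have hSi : pending v (i + 1) i = false := pending_succ_not_self v i h
        by_cases hfi : f = i
        · subst hfi
          rw [if_pos rfl, hSi, hPi]
          simp
        · rw [if_neg hfi]
          rw [pending_step_other v i f hv hi1 hf h hfi (by rw [← hvij, hji]; intro hh; exact hfi (mul_left_cancel₀ (by omega : (i:Int) ≠ 0) hh))]
          ring
    · rw [if_neg hm]
      have hnd : ¬ i ∣ v := fun hd => hm ((PySem.Int.mod_eq_zero_iff_dvd v i).mpr hd)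
      rw [pending_step_ndvd v i f hv hi1 hf h hnd]
  | case2 i res h =>
    intro hi1 hlen f hf
    rw [divLoop]
    simp only [h, dite_false]
    have : pending v i f = false := by
      simp only [pending, Bool.and_eq_false_iff, Bool.or_eq_false_iff]
      by_cases hd : f ∣ v
      · obtain ⟨g, hg⟩ := id hd
        by_cases hf1 : (1:Int) ≤ f
        · have hg1 : 1 ≤ g := by nlinarith
          right
          constructor
          · simp
            intro hsq
            nlinarith
          · simp
            intro hlt
            nlinarith
        · simp [hf1]
      · simp [hd]
    rw [this]
    simp
def tgt (nums : List Int) (f : Int) : Int := (nums.countP (fun x => decide (1 ≤ x ∧ f ∣ x)) : Int)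

lemma sum_multiples (nums : List Int) (MAX f : Int) (hf : 1 ≤ f)
    (hmax : ∀ x ∈ nums, x ≤ MAX) :
    ((PySem.List.pyRange f (MAX + 1) f).map (fun m => ((nums.count m : Nat) : Int))).sum
      = tgt nums f := by
  have hfpos : (0:Int) < f := by omega
  have hmem : ∀ m : Int, m ∈ PySem.List.pyRange f (MAX + 1) f ↔ f ≤ m ∧ m < MAX + 1 ∧ f ∣ m - f :=
    PySem.List.mem_pyRange_iff_of_pos hfpos
  have h1 : (PySem.List.pyRange f (MAX + 1) f).map (fun m => ((nums.count m : Nat) : Int))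
      = (PySem.List.pyRange f (MAX + 1) f).map
          (fun m => if (fun x => decide (1 ≤ x ∧ f ∣ x)) m then (nums.count m : Int) else 0) := by
    apply List.map_congr_left
    intro m hm
    obtain ⟨h2, h3, h4⟩ := (hmem m).mp hm
    have hd : f ∣ m := by
      have := dvd_add h4 (dvd_refl f)
      simpa using this
    have h1m : (1:Int) ≤ m := by omega
    simp [hd, h1m]
  rw [h1]
  exact sum_count_eq_countP _ _ (pyRange_nodup _ _ _ hfpos) nums (by
    intro x hx hq
    simp only [decide_eq_true_eq] at hq
    obtain ⟨hx1, hxd⟩ := hq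
    rw [hmem]
    refine ⟨Int.le_of_dvd (by omega) hxd, by have := hmax x hx; omega, ?_⟩
    exact dvd_sub hxd (dvd_refl f))



lemma fold_res_getD (v0 : List (Int × Int)) :
    ∀ (r : List Int),
    (∀ p ∈ v0, p.1 ≤ (r.length : Int) - 1) → ∀ f : Int, 1 ≤ f →
    (v0.foldl (fun r p => if p.1 < 1 then r else divLoop p.1 p.2 1 r) r).getD f.toNat 0
      = r.getD f.toNat 0 + (v0.map (fun p => if 1 ≤ p.1 ∧ f ∣ p.1 then p.2 else 0)).sum := by
  induction v0 with
  | nil => intro r _ f _; simp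
  | cons p v0 ih =>
    intro r hbound f hf
    simp only [List.foldl_cons, List.map_cons, List.sum_cons]
    by_cases hp : p.1 < 1
    · rw [if_pos hp]
      rw [ih r (fun q hq => hbound q (List.mem_cons_of_mem _ hq)) f hf]
      rw [if_neg (by omega : ¬ (1 ≤ p.1 ∧ f ∣ p.1))]
      ring
    · rw [if_neg hp]
      push_neg at hp
      have hlen : (divLoop p.1 p.2 1 r).length = r.length := divLoop_length _ _ _ _
      rw [ih (divLoop p.1 p.2 1 r)
        (fun q hq => by rw [hlen]; exact hbound q (List.mem_cons_of_mem _ hq)) f hf]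
      have hvlen : p.1 < (r.length : Int) := by
        have := hbound p (List.mem_cons_self)
        omega
      rw [divLoop_getD p.1 p.2 hp 1 r (by omega) hvlen f hf]
      rw [pending_one p.1 f hp hf]
      by_cases hd : f ∣ p.1
      · rw [if_pos (by simp [hd]), if_pos ⟨hp, hd⟩]
        ring
      · rw [if_neg (by simp [hd]), if_neg (by tauto)]
        ring

-- ===== VERDICT (by name: the statement is the Claim_ definition above) =====
theorem getMulti_spec : Claim_equal_getMulti := by
  intro nums _hdom _hpre
  unfold Spec_getMulti getMulti getMulti_alt
  cases hmax : PySem.List.max? nums (fun x => x) with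
  | none => rfl
  | some MAX =>
    dsimp only
    have hmaxle : ∀ x ∈ nums, x ≤ MAX := fun x hx => PySem.List.max?_isMax hmax x hx
    have hfs_mem : ∀ x ∈ PySem.List.pyRange 1 (MAX + 1) 1, 1 ≤ x ∧ x < MAX + 1 := by
      intro x hx
      have := (PySem.List.mem_pyRange_iff_of_pos one_pos x).mp hx
      exact ⟨this.1, this.2.1⟩
    have hfs_nodup : (PySem.List.pyRange 1 (MAX + 1) 1).Nodup := pyRange_nodup _ _ _ one_pos
    -- A side: collapse the inner loop, then the fresh-key insert loop
    have hA1 : (PySem.List.pyRange 1 (MAX + 1) 1).foldl (fun d factor =>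
          (PySem.List.pyRange factor (MAX + 1) factor).foldl (fun d multi =>
            d.modify factor 0 (· + (PySem.Dict.counter nums).getD multi 0)) d)
          PySem.Dict.empty
        = (PySem.List.pyRange 1 (MAX + 1) 1).foldl (fun d factor =>
            d.insert factor ((fun (dd : PySem.Dict Int Int) (ff : Int) => dd.getD ff 0 +
              ((PySem.List.pyRange ff (MAX + 1) ff).map
                (fun m => (PySem.Dict.counter nums).getD m 0)).sum) d factor))
            PySem.Dict.empty := by
      apply PySem.List.foldl_congr_mem
      intro acc x hx
      obtain ⟨hx1, hx2⟩ := hfs_mem x hx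
      apply inner_collapse
      apply List.ne_nil_of_mem (a := x)
      rw [PySem.List.mem_pyRange_iff_of_pos (by omega)]
      exact ⟨le_refl x, hx2, by simp⟩
    rw [hA1]
    rw [foldl_insert_items
      (fun ff => ((PySem.List.pyRange ff (MAX + 1) ff).map
          (fun m => (PySem.Dict.counter nums).getD m 0)).sum)
      _
      (fun d ff hfree => by rw [PySem.Dict.getD_of_not_contains d 0 hfree]; ring)
      _ _ hfs_nodup (fun f _ => PySem.Dict.contains_empty f)]
    rw [foldl_insert_items
      (fun ff => PySem.List.pyGetD ((PySem.Dict.counter nums).items.foldl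
          (fun r p => if p.1 < 1 then r else divLoop p.1 p.2 1 r)
          (List.replicate (MAX + 1).toNat 0)) ff 0)
      _
      (fun d ff hfree => rfl)
      _ _ hfs_nodup (fun f _ => PySem.Dict.contains_empty f)]
    show [] ++ _ = [] ++ _
    congr 1
    apply List.map_congr_left
    intro f hf
    obtain ⟨hf1, hf2⟩ := hfs_mem f hf
    congr 1
    -- A's value for factor f
    have hAval : ((PySem.List.pyRange f (MAX + 1) f).map
        (fun m => (PySem.Dict.counter nums).getD m 0)).sum = tgt nums f := by
      rw [List.map_congr_left (fun m _ => PySem.Dict.getD_counter nums m)]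
      exact sum_multiples nums MAX f hf1 hmaxle
    rw [hAval]
    -- B's value for factor f
    have hlen0 : ((List.replicate (MAX + 1).toNat (0:Int)).length : Int) = MAX + 1 := by
      simp; omega
    have hbound : ∀ p ∈ (PySem.Dict.counter nums).items,
        p.1 ≤ ((List.replicate (MAX + 1).toNat (0:Int)).length : Int) - 1 := by
      intro p hp
      rw [PySem.Dict.items_counter] at hp
      obtain ⟨k, hk, rfl⟩ := List.mem_map.mp hp
      have : k ∈ nums := (PySem.Set.mem_ofList nums k).mp hk
      have := hmaxle k this
      omega
    rw [PySem.List.pyGetD_of_nonneg _ 0 (by omega : (0:Int) ≤ f)]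
    rw [fold_res_getD _ _ hbound f hf1]
    have h0 : (List.replicate (MAX + 1).toNat (0:Int)).getD f.toNat 0 = 0 := by
      simp [List.getD]
    rw [h0, PySem.Dict.items_counter, List.map_map]
    have hcomp : ((fun p : Int × Int => if 1 ≤ p.1 ∧ f ∣ p.1 then p.2 else 0) ∘
          (fun k : Int => (k, (nums.count k : Int))))
        = fun v => if (fun x => decide (1 ≤ x ∧ f ∣ x)) v then (nums.count v : Int) else 0 := by
      funext v
      by_cases h : 1 ≤ v ∧ f ∣ v <;> simp [h]
    rw [hcomp]
    rw [sum_count_eq_countP (PySem.Set.ofList nums) _ (PySem.Set.nodup_ofList nums) nums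
      (fun x hx _ => (PySem.Set.mem_ofList nums x).mpr hx)]
    rw [tgt]
    ring
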